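-- pv_equiv track=rewrite | github.com/WeichiZhang/movie-recommender-new | feature_extractor.py | _derive_mood
-- ===== SOURCE A (Python) =====
-- from typing import Dict, List, Any, Optional
--
-- def _derive_mood(genres: List[str]) -> List[str]:
--     mood_scores = {'Positive': 0, 'Intense': 0, 'Dark': 0, 'Thoughtful': 0}
--
--     mood_mapping = {
--         'Positive': ['Comedy', 'Musical', 'Animation', 'Children'],
--         'Intense': ['Action', 'Adventure', 'Thriller'],
--         'Dark': ['Horror', 'Film-Noir', 'Crime'],
--         'Thoughtful': ['Drama', 'Documentary', 'War']
--     }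
--
--     for mood, mood_genres in mood_mapping.items():
--         for genre in genres:
--             if genre in mood_genres:
--                 mood_scores[mood] += 1
--
--     # Return top 2 moods
--     return [mood for mood, _ in sorted(mood_scores.items(), key=lambda x: x[1], reverse=True)[:2]]
-- ===== SOURCE B (Python) =====
-- _GENRE_TO_MOOD = {
--     'Comedy': 'Positive', 'Musical': 'Positive', 'Animation': 'Positive', 'Children': 'Positive',
--     'Action': 'Intense', 'Adventure': 'Intense', 'Thriller': 'Intense',
--     'Horror': 'Dark', 'Film-Noir': 'Dark', 'Crime': 'Dark',
--     'Drama': 'Thoughtful', 'Documentary': 'Thoughtful', 'War': 'Thoughtful',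
-- }
--
-- _MOODS = ['Positive', 'Intense', 'Dark', 'Thoughtful']
--
-- def _derive_mood(genres):
--     scores = {m: 0 for m in _MOODS}
--     for g in genres:
--         m = _GENRE_TO_MOOD.get(g)
--         if m is not None:
--             scores[m] += 1
--     first = max(_MOODS, key=lambda m: scores[m])
--     second = max([m for m in _MOODS if m != first], key=lambda m: scores[m])
--     return [first, second]
-- ===== Notes on version B (the rewrite author's own statement) =====
-- stated objective: faster
-- what changed: B inverts the mood mapping into a genre-to-mood index and counts in one pass over genres instead of A's per-mood membership scans, then picks the top two moods by two stable max selections instead of sorting the four scores.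
import Mathlib
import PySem

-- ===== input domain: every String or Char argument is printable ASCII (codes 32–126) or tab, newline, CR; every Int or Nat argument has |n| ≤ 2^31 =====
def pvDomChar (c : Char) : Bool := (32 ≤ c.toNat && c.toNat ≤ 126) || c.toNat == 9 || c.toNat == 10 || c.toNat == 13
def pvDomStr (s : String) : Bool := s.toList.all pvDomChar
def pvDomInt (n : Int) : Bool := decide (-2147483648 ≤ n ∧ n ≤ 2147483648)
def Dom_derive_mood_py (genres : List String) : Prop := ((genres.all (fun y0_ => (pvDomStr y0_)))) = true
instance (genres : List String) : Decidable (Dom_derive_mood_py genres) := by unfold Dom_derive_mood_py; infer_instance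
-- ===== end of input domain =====

-- B replaces A's mood-by-mood nested scans with an inverted genre→mood index, one counting
-- pass over genres, and two stable max selections instead of a sort (objective: faster; measured).

-- ===== PORT A =====
def derive_mood_py (genres : List String) : List String :=
  let mood_scores : PySem.Dict String Int :=
    ((((PySem.Dict.empty.insert "Positive" 0).insert "Intense" 0).insert "Dark" 0).insert "Thoughtful" 0)
  let mood_mapping : List (String × List String) :=
    [("Positive", ["Comedy", "Musical", "Animation", "Children"]),
     ("Intense", ["Action", "Adventure", "Thriller"]),
     ("Dark", ["Horror", "Film-Noir", "Crime"]),
     ("Thoughtful", ["Drama", "Documentary", "War"])]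
  let final : PySem.Dict String Int :=
    mood_mapping.foldl (fun d p =>
      genres.foldl (fun d genre =>
        if genre ∈ p.2 then d.modify p.1 0 (· + 1) else d) d) mood_scores
  ((PySem.List.sorted final.items (fun x => x.2) true).take 2).map (fun p => p.1)

-- ===== PORT B =====
def pvGenreToMood : PySem.Dict String String :=
  PySem.Dict.ofList
    [("Comedy", "Positive"), ("Musical", "Positive"), ("Animation", "Positive"), ("Children", "Positive"),
     ("Action", "Intense"), ("Adventure", "Intense"), ("Thriller", "Intense"),
     ("Horror", "Dark"), ("Film-Noir", "Dark"), ("Crime", "Dark"),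
     ("Drama", "Thoughtful"), ("Documentary", "Thoughtful"), ("War", "Thoughtful")]

def pvMoods : List String := ["Positive", "Intense", "Dark", "Thoughtful"]

def derive_mood_py_alt (genres : List String) : List String :=
  let scores0 : PySem.Dict String Int :=
    pvMoods.foldl (fun d m => d.insert m 0) PySem.Dict.empty
  let scores : PySem.Dict String Int :=
    genres.foldl (fun d g =>
      match pvGenreToMood.get? g with
      | some m => d.modify m 0 (· + 1)
      | none => d) scores0
  let first : String := (PySem.List.max? pvMoods (fun m => scores.getD m 0)).getD ""
  let second : String :=
    (PySem.List.max? (pvMoods.filter (fun m => m ≠ first)) (fun m => scores.getD m 0)).getD ""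
  [first, second]

-- ===== PRECONDITION & SPEC =====
def Spec_derive_mood_py (genres : List String) (out : List String) : Prop := out = derive_mood_py_alt genres
instance (genres : List String) (out : List String) : Decidable (Spec_derive_mood_py genres out) := by unfold Spec_derive_mood_py; infer_instance

-- ===== CLAIM (what is proved, stated in full; the proofs are below) =====
def Claim_equal_derive_mood_py : Prop := ∀ (genres : List String), Dom_derive_mood_py genres → Spec_derive_mood_py genres (derive_mood_py genres)

-- ===== LEMMAS AND PROOFS =====

-- number of genres falling in the list L (with multiplicity)
def cnt (L : List String) (gs : List String) : Int := (gs.countP (fun g => decide (g ∈ L)) : Int)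

-- the four-mood score dict, as a literal
def mkd (a b c d : Int) : PySem.Dict String Int :=
  PySem.Dict.mk [("Positive",a),("Intense",b),("Dark",c),("Thoughtful",d)]

-- A's tail: stable reverse sort by score, take 2, project the mood
def tailA (a b c d : Int) : List String :=
  ((PySem.List.sorted [("Positive",a),("Intense",b),("Dark",c),("Thoughtful",d)] (fun x => x.2) true).take 2).map (fun p => p.1)

-- B's tail: first stable max, then stable max of the rest
def tailB (a b c d : Int) : List String :=
  let scores := PySem.Dict.mk [("Positive",a),("Intense",b),("Dark",c),("Thoughtful",d)]
  let first : String := (PySem.List.max? ["Positive", "Intense", "Dark", "Thoughtful"] (fun m => scores.getD m 0)).getD ""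
  let second : String :=
    (PySem.List.max? ((["Positive", "Intense", "Dark", "Thoughtful"] : List String).filter (fun m => m ≠ first)) (fun m => scores.getD m 0)).getD ""
  [first, second]

theorem stepP (a b c d : Int) : (mkd a b c d).modify "Positive" 0 (· + 1) = mkd (a+1) b c d := by
  simp [mkd, PySem.Dict.modify, PySem.Dict.insert, PySem.Dict.getD, PySem.Dict.get?, PySem.Dict.contains]
theorem stepI (a b c d : Int) : (mkd a b c d).modify "Intense" 0 (· + 1) = mkd a (b+1) c d := by
  simp [mkd, PySem.Dict.modify, PySem.Dict.insert, PySem.Dict.getD, PySem.Dict.get?, PySem.Dict.contains]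
theorem stepD (a b c d : Int) : (mkd a b c d).modify "Dark" 0 (· + 1) = mkd a b (c+1) d := by
  simp [mkd, PySem.Dict.modify, PySem.Dict.insert, PySem.Dict.getD, PySem.Dict.get?, PySem.Dict.contains]
theorem stepT (a b c d : Int) : (mkd a b c d).modify "Thoughtful" 0 (· + 1) = mkd a b c (d+1) := by
  simp [mkd, PySem.Dict.modify, PySem.Dict.insert, PySem.Dict.getD, PySem.Dict.get?, PySem.Dict.contains]

-- A's four inner loops, one lemma each
theorem loopA_P (gs : List String) : ∀ (a b c d : Int),
    gs.foldl (fun dd g => if g ∈ ["Comedy", "Musical", "Animation", "Children"] then dd.modify "Positive" 0 (· + 1) else dd)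
      (mkd a b c d)
    = mkd (a + cnt ["Comedy", "Musical", "Animation", "Children"] gs) b c d := by
  induction gs with
  | nil => intro a b c d; simp [cnt]
  | cons g t ih =>
    intro a b c d
    simp only [List.foldl_cons]
    by_cases hp : g ∈ ["Comedy", "Musical", "Animation", "Children"]
    · rw [if_pos hp, stepP, ih]
      simp only [List.mem_cons, List.not_mem_nil, or_false] at hp
      rcases hp with rfl|rfl|rfl|rfl <;> · simp [mkd, cnt, List.countP_cons]; omega
    · rw [if_neg hp, ih]
      simp only [List.mem_cons, List.not_mem_nil, or_false, not_or] at hp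
      simp [mkd, cnt, List.countP_cons, hp.1, hp.2.1, hp.2.2.1, hp.2.2.2]

theorem loopA_I (gs : List String) : ∀ (a b c d : Int),
    gs.foldl (fun dd g => if g ∈ ["Action", "Adventure", "Thriller"] then dd.modify "Intense" 0 (· + 1) else dd)
      (mkd a b c d)
    = mkd a (b + cnt ["Action", "Adventure", "Thriller"] gs) c d := by
  induction gs with
  | nil => intro a b c d; simp [cnt]
  | cons g t ih =>
    intro a b c d
    simp only [List.foldl_cons]
    by_cases hp : g ∈ ["Action", "Adventure", "Thriller"]
    · rw [if_pos hp, stepI, ih]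
      simp only [List.mem_cons, List.not_mem_nil, or_false] at hp
      rcases hp with rfl|rfl|rfl <;> · simp [mkd, cnt, List.countP_cons]; omega
    · rw [if_neg hp, ih]
      simp only [List.mem_cons, List.not_mem_nil, or_false, not_or] at hp
      simp [mkd, cnt, List.countP_cons, hp.1, hp.2.1, hp.2.2]

theorem loopA_D (gs : List String) : ∀ (a b c d : Int),
    gs.foldl (fun dd g => if g ∈ ["Horror", "Film-Noir", "Crime"] then dd.modify "Dark" 0 (· + 1) else dd)
      (mkd a b c d)
    = mkd a b (c + cnt ["Horror", "Film-Noir", "Crime"] gs) d := by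
  induction gs with
  | nil => intro a b c d; simp [cnt]
  | cons g t ih =>
    intro a b c d
    simp only [List.foldl_cons]
    by_cases hp : g ∈ ["Horror", "Film-Noir", "Crime"]
    · rw [if_pos hp, stepD, ih]
      simp only [List.mem_cons, List.not_mem_nil, or_false] at hp
      rcases hp with rfl|rfl|rfl <;> · simp [mkd, cnt, List.countP_cons]; omega
    · rw [if_neg hp, ih]
      simp only [List.mem_cons, List.not_mem_nil, or_false, not_or] at hp
      simp [mkd, cnt, List.countP_cons, hp.1, hp.2.1, hp.2.2]

theorem loopA_T (gs : List String) : ∀ (a b c d : Int),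
    gs.foldl (fun dd g => if g ∈ ["Drama", "Documentary", "War"] then dd.modify "Thoughtful" 0 (· + 1) else dd)
      (mkd a b c d)
    = mkd a b c (d + cnt ["Drama", "Documentary", "War"] gs) := by
  induction gs with
  | nil => intro a b c d; simp [cnt]
  | cons g t ih =>
    intro a b c d
    simp only [List.foldl_cons]
    by_cases hp : g ∈ ["Drama", "Documentary", "War"]
    · rw [if_pos hp, stepT, ih]
      simp only [List.mem_cons, List.not_mem_nil, or_false] at hp
      rcases hp with rfl|rfl|rfl <;> · simp [mkd, cnt, List.countP_cons]; omega
    · rw [if_neg hp, ih]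
      simp only [List.mem_cons, List.not_mem_nil, or_false, not_or] at hp
      simp [mkd, cnt, List.countP_cons, hp.1, hp.2.1, hp.2.2]

-- B's single counting pass
theorem loopB (gs : List String) : ∀ (a b c d : Int),
    gs.foldl (fun dd g =>
        match pvGenreToMood.get? g with
        | some m => dd.modify m 0 (· + 1)
        | none => dd)
      (mkd a b c d)
    = mkd (a + cnt ["Comedy", "Musical", "Animation", "Children"] gs)
          (b + cnt ["Action", "Adventure", "Thriller"] gs)
          (c + cnt ["Horror", "Film-Noir", "Crime"] gs)
          (d + cnt ["Drama", "Documentary", "War"] gs) := by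
  induction gs with
  | nil => intro a b c d; simp [cnt]
  | cons g t ih =>
    intro a b c d
    simp only [List.foldl_cons]
    by_cases h1 : g ∈ ["Comedy", "Musical", "Animation", "Children"]
    · simp only [List.mem_cons, List.not_mem_nil, or_false] at h1
      rcases h1 with rfl|rfl|rfl|rfl <;>
        · rw [show pvGenreToMood.get? _ = some "Positive" from by decide]
          rw [show ∀ dd : PySem.Dict String Int, (match some "Positive" with
                | some m => dd.modify m 0 (· + 1) | none => dd) = dd.modify "Positive" 0 (· + 1) from fun _ => rfl]
          rw [stepP, ih]
          simp [mkd, cnt, List.countP_cons] <;> omega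
    · by_cases h2 : g ∈ ["Action", "Adventure", "Thriller"]
      · simp only [List.mem_cons, List.not_mem_nil, or_false] at h2
        rcases h2 with rfl|rfl|rfl <;>
          · rw [show pvGenreToMood.get? _ = some "Intense" from by decide]
            rw [show ∀ dd : PySem.Dict String Int, (match some "Intense" with
                  | some m => dd.modify m 0 (· + 1) | none => dd) = dd.modify "Intense" 0 (· + 1) from fun _ => rfl]
            rw [stepI, ih]
            simp [mkd, cnt, List.countP_cons] <;> omega
      · by_cases h3 : g ∈ ["Horror", "Film-Noir", "Crime"]
        · simp only [List.mem_cons, List.not_mem_nil, or_false] at h3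
          rcases h3 with rfl|rfl|rfl <;>
            · rw [show pvGenreToMood.get? _ = some "Dark" from by decide]
              rw [show ∀ dd : PySem.Dict String Int, (match some "Dark" with
                    | some m => dd.modify m 0 (· + 1) | none => dd) = dd.modify "Dark" 0 (· + 1) from fun _ => rfl]
              rw [stepD, ih]
              simp [mkd, cnt, List.countP_cons] <;> omega
        · by_cases h4 : g ∈ ["Drama", "Documentary", "War"]
          · simp only [List.mem_cons, List.not_mem_nil, or_false] at h4
            rcases h4 with rfl|rfl|rfl <;>
              · rw [show pvGenreToMood.get? _ = some "Thoughtful" from by decide]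
                rw [show ∀ dd : PySem.Dict String Int, (match some "Thoughtful" with
                      | some m => dd.modify m 0 (· + 1) | none => dd) = dd.modify "Thoughtful" 0 (· + 1) from fun _ => rfl]
                rw [stepT, ih]
                simp [mkd, cnt, List.countP_cons] <;> omega
          · have hg : pvGenreToMood.get? g = none := by
              simp only [List.mem_cons, List.not_mem_nil, or_false, not_or] at h1 h2 h3 h4
              obtain ⟨n1,n2,n3,n4⟩ := h1; obtain ⟨n5,n6,n7⟩ := h2
              obtain ⟨n8,n9,n10⟩ := h3; obtain ⟨n11,n12,n13⟩ := h4
              rw [show pvGenreToMood = PySem.Dict.mk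
                  [("Comedy", "Positive"), ("Musical", "Positive"), ("Animation", "Positive"), ("Children", "Positive"),
                   ("Action", "Intense"), ("Adventure", "Intense"), ("Thriller", "Intense"),
                   ("Horror", "Dark"), ("Film-Noir", "Dark"), ("Crime", "Dark"),
                   ("Drama", "Thoughtful"), ("Documentary", "Thoughtful"), ("War", "Thoughtful")] from by decide]
              simp [PySem.Dict.get?, List.find?,
                beq_eq_false_iff_ne, beq_eq_false_iff_ne.mpr (Ne.symm n1), beq_eq_false_iff_ne.mpr (Ne.symm n2), beq_eq_false_iff_ne.mpr (Ne.symm n3), beq_eq_false_iff_ne.mpr (Ne.symm n4),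
                beq_eq_false_iff_ne.mpr (Ne.symm n5), beq_eq_false_iff_ne.mpr (Ne.symm n6), beq_eq_false_iff_ne.mpr (Ne.symm n7), beq_eq_false_iff_ne.mpr (Ne.symm n8), beq_eq_false_iff_ne.mpr (Ne.symm n9), beq_eq_false_iff_ne.mpr (Ne.symm n10),
                beq_eq_false_iff_ne.mpr (Ne.symm n11), beq_eq_false_iff_ne.mpr (Ne.symm n12), beq_eq_false_iff_ne.mpr (Ne.symm n13)]
            rw [show (match pvGenreToMood.get? g with
                  | some m => (mkd a b c d).modify m 0 (· + 1) | none => mkd a b c d) = mkd a b c d from by rw [hg]]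
            rw [ih]
            simp only [List.mem_cons, List.not_mem_nil, or_false, not_or] at h1 h2 h3 h4
            simp [mkd, cnt, List.countP_cons, h1.1, h1.2.1, h1.2.2.1, h1.2.2.2,
              h2.1, h2.2.1, h2.2.2, h3.1, h3.2.1, h3.2.2, h4.1, h4.2.1, h4.2.2]

theorem A_eval (gs : List String) :
    derive_mood_py gs = tailA (cnt ["Comedy", "Musical", "Animation", "Children"] gs)
      (cnt ["Action", "Adventure", "Thriller"] gs)
      (cnt ["Horror", "Film-Noir", "Crime"] gs)
      (cnt ["Drama", "Documentary", "War"] gs) := by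
  unfold derive_mood_py
  rw [show ((((PySem.Dict.empty.insert "Positive" (0:Int)).insert "Intense" 0).insert "Dark" 0).insert "Thoughtful" 0) = mkd 0 0 0 0 from by decide]
  simp only [List.foldl_cons, List.foldl_nil]
  rw [loopA_P, loopA_I, loopA_D, loopA_T]
  simp [tailA, mkd]

theorem B_eval (gs : List String) :
    derive_mood_py_alt gs = tailB (cnt ["Comedy", "Musical", "Animation", "Children"] gs)
      (cnt ["Action", "Adventure", "Thriller"] gs)
      (cnt ["Horror", "Film-Noir", "Crime"] gs)
      (cnt ["Drama", "Documentary", "War"] gs) := by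
  simp only [derive_mood_py_alt, pvMoods,
    show (((["Positive", "Intense", "Dark", "Thoughtful"] : List String).foldl (fun d m => d.insert m (0:Int)) PySem.Dict.empty)) = mkd 0 0 0 0 from by decide,
    loopB]
  simp [tailB, mkd]

set_option maxHeartbeats 2000000 in
theorem tails_eq (a b c d : Int) : tailA a b c d = tailB a b c d := by
  simp only [tailA, tailB]
  rcases lt_trichotomy a b with h1|h1|h1 <;> rcases lt_trichotomy a c with h2|h2|h2 <;>
  rcases lt_trichotomy a d with h3|h3|h3 <;> rcases lt_trichotomy b c with h4|h4|h4 <;>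
  rcases lt_trichotomy b d with h5|h5|h5 <;> rcases lt_trichotomy c d with h6|h6|h6 <;>
  simp_all [PySem.List.sorted_rev_eq_foldl_insertBy, PySem.List.insertBy, PySem.List.max?,
    PySem.Dict.getD, PySem.Dict.get?, List.find?, List.filter, not_lt_of_gt] <;> omega

-- ===== VERDICT (by name: the statement is the Claim_ definition above) =====
theorem derive_mood_py_spec : Claim_equal_derive_mood_py := by
  intro gs _
  unfold Spec_derive_mood_py
  rw [A_eval, B_eval, tails_eq]
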